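-- pv_equiv track=rewrite | github.com/tmoertel/practice | dailycodingproblem_com/p313_circular_lock.py | minimal_combination_moves
-- ===== SOURCE A (Python) =====
-- import collections
--
-- STARTING_COMBINATION = 000
--
-- def int_to_3_digits(i):
--     chars = f'{i:03d}'
--     return [ord(c) - ord('0') for c in chars]
--
-- def digits_to_int(digits):
--     place_value = 1
--     total = 0
--     for i in 2, 1, 0:
--         total += digits[i] * place_value
--         place_value *= 10
--     return total
--
-- def neighbors(combination):
--     """Yields all combinations one move from a combination."""
--     digits = int_to_3_digits(combination)
--     up = lambda digit: (digit + 1) % 10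
--     down = lambda digit: (digit - 1) % 10
--     for i, digit in enumerate(digits):
--         for new_digit in up(digit), down(digit):
--             new_digits = digits.copy()
--             new_digits[i] = new_digit
--             yield digits_to_int(new_digits)
--
-- def minimal_combination_moves(target_combination, dead_end_combinations=None):
--     """Returns min number of moves to reach the target from 000."""
--     dead_end_combinations = set(dead_end_combinations or [])
--     frontier = collections.deque()
--     seen = set()
--     def schedule(combination, distance):
--         if combination not in seen and combination not in dead_end_combinations:
--             seen.add(combination)
--             frontier.append((combination, distance))
--     schedule(STARTING_COMBINATION, 0)
--     while frontier:
--         combination, distance = frontier.popleft()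
--         if combination == target_combination:
--             return distance
--         for neighboring_combination in neighbors(combination):
--             schedule(neighboring_combination, distance + 1)
--     return None
-- ===== SOURCE B (Python) =====
-- def int_to_3_digits(i):
--     chars = f'{i:03d}'
--     return [ord(c) - ord('0') for c in chars]
--
--
-- def digits_to_int(digits):
--     place_value = 1
--     total = 0
--     for i in 2, 1, 0:
--         total += digits[i] * place_value
--         place_value *= 10
--     return total
--
--
-- def neighbors(combination):
--     """Yields all combinations one move from a combination."""
--     digits = int_to_3_digits(combination)
--     up = lambda digit: (digit + 1) % 10
--     down = lambda digit: (digit - 1) % 10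
--     for i, digit in enumerate(digits):
--         for new_digit in up(digit), down(digit):
--             new_digits = digits.copy()
--             new_digits[i] = new_digit
--             yield digits_to_int(new_digits)
--
--
-- def minimal_combination_moves(target_combination, dead_end_combinations=None):
--     """Returns min number of moves to reach the target from 000.
--
--     Level-synchronous BFS: the whole frontier of one distance is expanded at
--     once, so a single distance counter replaces per-node distances.
--     """
--     dead_ends = set(dead_end_combinations or [])
--     seen = set()
--     current = []
--     if 0 not in dead_ends:
--         seen.add(0)
--         current.append(0)
--     distance = 0
--     while current:
--         if target_combination in current:
--             return distance
--         next_level = []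
--         for combination in current:
--             for n in neighbors(combination):
--                 if n not in seen and n not in dead_ends:
--                     seen.add(n)
--                     next_level.append(n)
--         current = next_level
--         distance += 1
--     return None
-- ===== Notes on version B (the rewrite author's own statement) =====
-- stated objective: alternative
-- what changed: Queue-based BFS carrying a per-node (combination, distance) pair and a schedule closure is replaced by level-synchronous BFS: a whole-frontier list expanded one distance level at a time with a single distance counter, no queue and no per-node distances.
import Mathlib
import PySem

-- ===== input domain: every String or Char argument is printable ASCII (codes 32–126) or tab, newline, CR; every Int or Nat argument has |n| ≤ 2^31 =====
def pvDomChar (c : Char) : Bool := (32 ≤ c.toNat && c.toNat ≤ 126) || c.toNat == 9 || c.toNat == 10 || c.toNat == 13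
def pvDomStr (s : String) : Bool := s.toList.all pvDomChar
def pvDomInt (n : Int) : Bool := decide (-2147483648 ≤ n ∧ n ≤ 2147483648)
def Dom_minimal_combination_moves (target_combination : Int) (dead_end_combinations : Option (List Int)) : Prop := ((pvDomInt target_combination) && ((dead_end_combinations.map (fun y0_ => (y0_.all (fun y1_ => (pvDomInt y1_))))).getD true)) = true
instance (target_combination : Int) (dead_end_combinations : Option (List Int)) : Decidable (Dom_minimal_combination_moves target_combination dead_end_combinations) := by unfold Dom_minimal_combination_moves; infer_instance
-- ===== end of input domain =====

-- B replaces A's FIFO queue of (combination, distance) pairs by level-synchronous BFS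
-- (whole frontier expanded per distance level, one distance counter); same return value.

-- ===== PORT A =====
-- f'{i:03d}': str(i) zero-padded to width 3 (padding goes after a '-' sign)
def pvFmt03 (i : Int) : List Char :=
  let s := PySem.Int.toChars i
  if 3 ≤ s.length then s
  else match s with
       | '-' :: rest => '-' :: (List.replicate (3 - s.length) '0' ++ rest)
       | _ => List.replicate (3 - s.length) '0' ++ s

def int_to_3_digits (i : Int) : List Int :=
  (pvFmt03 i).map (fun c => (c.toNat : Int) - 48)

-- digits[i] is in range for every call (the digit lists always have length ≥ 3),
-- so the total pyGetD is exact here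
def digits_to_int (ds : List Int) : Int :=
  (([2, 1, 0] : List Int).foldl
    (fun (st : Int × Int) i => (st.1 * 10, st.2 + PySem.List.pyGetD ds i 0 * st.1)) (1, 0)).2

def nbrs (c : Int) : List Int :=
  let ds := int_to_3_digits c
  (PySem.List.enumerate ds).flatMap (fun p =>
    [PySem.Int.mod (p.2 + 1) 10, PySem.Int.mod (p.2 - 1) 10].map
      (fun nd => digits_to_int (PySem.List.pySetD ds p.1 nd)))

def mcm_schedule (dead : PySem.Set Int) (st : PySem.Set Int × List (Int × Int))
    (c dist : Int) : PySem.Set Int × List (Int × Int) :=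
  if !(st.1.contains c) && !(dead.contains c) then (st.1.add c, st.2 ++ [(c, dist)]) else st

-- Every scheduled combination lies in 0..999, so at most 1000 entries ever enter the
-- queue and the Python loop runs at most 1000 iterations: the fuel 1001 is a pure
-- totality guard, never exhausted.
def mcm_loop (target : Int) (dead : PySem.Set Int) :
    Nat → PySem.Set Int → List (Int × Int) → Option Int
  | 0, _, _ => none
  | _ + 1, _, [] => none
  | fuel + 1, seen, (c, d) :: rest =>
    if c = target then some d
    else
      let st := (nbrs c).foldl (fun st n => mcm_schedule dead st n (d + 1)) (seen, rest)
      mcm_loop target dead fuel st.1 st.2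

def minimal_combination_moves (target_combination : Int) (dead_end_combinations : Option (List Int)) : Option Int :=
  let dead : PySem.Set Int := PySem.Set.ofList (dead_end_combinations.getD [])
  let st := mcm_schedule dead (PySem.Set.empty, []) 0 0
  mcm_loop target_combination dead 1001 st.1 st.2

-- ===== PORT B =====
def mcm_push (dead : PySem.Set Int) (st : PySem.Set Int × List Int) (n : Int) :
    PySem.Set Int × List Int :=
  if !(st.1.contains n) && !(dead.contains n) then (st.1.add n, st.2 ++ [n]) else st

def mcm_expand (dead : PySem.Set Int) (st : PySem.Set Int × List Int) (c : Int) :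
    PySem.Set Int × List Int :=
  (nbrs c).foldl (mcm_push dead) st

-- Nonempty levels are pairwise disjoint subsets of 0..999, so there are at most 1000
-- of them: the fuel 1001 is a pure totality guard, never exhausted.
def mcm_alt_loop (target : Int) (dead : PySem.Set Int) :
    Nat → PySem.Set Int → List Int → Int → Option Int
  | 0, _, _, _ => none
  | fuel + 1, seen, current, dist =>
    if current = [] then none
    else if current.contains target then some dist
    else
      let st := current.foldl (mcm_expand dead) (seen, [])
      mcm_alt_loop target dead fuel st.1 st.2 (dist + 1)

def minimal_combination_moves_alt (target_combination : Int) (dead_end_combinations : Option (List Int)) : Option Int :=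
  let dead : PySem.Set Int := PySem.Set.ofList (dead_end_combinations.getD [])
  if !(dead.contains 0) then
    mcm_alt_loop target_combination dead 1001 (PySem.Set.empty.add 0) [0] 0
  else
    mcm_alt_loop target_combination dead 1001 PySem.Set.empty [] 0

-- ===== PRECONDITION & SPEC =====
def Spec_minimal_combination_moves (target_combination : Int) (dead_end_combinations : Option (List Int)) (out : Option Int) : Prop := out = minimal_combination_moves_alt target_combination dead_end_combinations
instance (target_combination : Int) (dead_end_combinations : Option (List Int)) (out : Option Int) : Decidable (Spec_minimal_combination_moves target_combination dead_end_combinations out) := by unfold Spec_minimal_combination_moves; infer_instance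

-- ===== CLAIM (what is proved, stated in full; the proofs are below) =====
def Claim_equal_minimal_combination_moves : Prop := ∀ (target_combination : Int) (dead_end_combinations : Option (List Int)), Dom_minimal_combination_moves target_combination dead_end_combinations → Spec_minimal_combination_moves target_combination dead_end_combinations (minimal_combination_moves target_combination dead_end_combinations)

-- ===== LEMMAS AND PROOFS =====

-- all neighbors of an in-range combination are in range (checked over all 1000 cases)
set_option maxHeartbeats 4000000 in
set_option maxRecDepth 10000 in
theorem nbrs_range_aux :
    (List.range 1000).all
      (fun m => (nbrs (m : Int)).all (fun n => decide (0 ≤ n) && decide (n < 1000))) = true := by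
  decide

theorem nbrs_range (c : Int) (h0 : 0 ≤ c) (h1 : c < 1000) :
    ∀ n ∈ nbrs c, 0 ≤ n ∧ n < 1000 := by
  intro n hn
  have hc : ((c.toNat : Nat) : Int) = c := Int.toNat_of_nonneg h0
  have hm : c.toNat ∈ List.range 1000 := by
    rw [List.mem_range]; omega
  have h2 := (List.all_eq_true.mp nbrs_range_aux) _ hm
  have h3 := (List.all_eq_true.mp h2) n (by rwa [hc])
  simpa using h3

theorem contains_add (s : PySem.Set Int) (x n : Int) :
    (s.add n).contains x = (s.contains x || x == n) := by
  rw [Bool.eq_iff_iff]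
  simp [PySem.Set.mem_add]

-- number of combinations in 0..999 not yet seen
def unseenIn (seen : PySem.Set Int) : Nat :=
  ((Finset.range 1000).filter (fun (m : Nat) => ¬ seen.contains (m : Int) = true)).card

theorem unseen_add (seen : PySem.Set Int) (n : Int) (h0 : 0 ≤ n) (h1 : n < 1000)
    (h : seen.contains n = false) : unseenIn (seen.add n) + 1 = unseenIn seen := by
  have hk : ((n.toNat : Nat) : Int) = n := Int.toNat_of_nonneg h0
  have hfe : (Finset.range 1000).filter (fun (m : Nat) => ¬ (seen.add n).contains (m : Int) = true)
      = ((Finset.range 1000).filter (fun (m : Nat) => ¬ seen.contains (m : Int) = true)).filter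
          (fun m => m ≠ n.toNat) := by
    rw [Finset.filter_filter]
    apply Finset.filter_congr
    intro m _
    constructor
    · intro hmem
      rw [contains_add] at hmem
      simp only [Bool.or_eq_true, beq_iff_eq] at hmem
      push Not at hmem
      refine ⟨by simpa using hmem.1, ?_⟩
      intro hmn
      exact hmem.2 (by rw [hmn, hk])
    · intro ⟨hm1, hm2⟩
      rw [contains_add]
      simp only [Bool.or_eq_true, beq_iff_eq]
      push Not
      refine ⟨by simpa using hm1, ?_⟩
      intro he
      exact hm2 (by omega)
  have hmem : n.toNat ∈ (Finset.range 1000).filter (fun (m : Nat) => ¬ seen.contains (m : Int) = true) := by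
    rw [Finset.mem_filter, Finset.mem_range]
    refine ⟨by omega, by rw [hk, h]; simp⟩
  unfold unseenIn
  rw [hfe, Finset.filter_ne', Finset.card_erase_of_mem hmem]
  have := Finset.card_pos.mpr ⟨_, hmem⟩
  omega

theorem unseen_le_of_zero (seen : PySem.Set Int) (h : seen.contains 0 = true) :
    unseenIn seen ≤ 999 := by
  have hsub : (Finset.range 1000).filter (fun (m : Nat) => ¬ seen.contains (m : Int) = true)
      ⊆ (Finset.range 1000).erase 0 := by
    intro m hm
    rw [Finset.mem_filter] at hm
    rw [Finset.mem_erase]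
    refine ⟨?_, hm.1⟩
    intro h0
    subst h0
    exact hm.2 (by simpa using h)
  have := Finset.card_le_card hsub
  rw [Finset.card_erase_of_mem (by simp), Finset.card_range] at this
  exact this

-- invariant carried through B's per-level fold: queued nodes are seen and in range
def PvInv (st : PySem.Set Int × List Int) : Prop :=
  ∀ x ∈ st.2, st.1.contains x = true ∧ 0 ≤ x ∧ x < 1000

theorem pv_foldl_step {f : (PySem.Set Int × List Int) → Int → (PySem.Set Int × List Int)}
    {P : Int → Prop}
    (hf : ∀ st n, P n → PvInv st →
      PvInv (f st n) ∧
      unseenIn (f st n).1 + (f st n).2.length = unseenIn st.1 + st.2.length ∧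
      (∀ x, st.1.contains x = true → (f st n).1.contains x = true)) :
    ∀ (ns : List Int) (st : PySem.Set Int × List Int), (∀ n ∈ ns, P n) → PvInv st →
      PvInv (ns.foldl f st) ∧
      unseenIn (ns.foldl f st).1 + (ns.foldl f st).2.length = unseenIn st.1 + st.2.length ∧
      (∀ x, st.1.contains x = true → (ns.foldl f st).1.contains x = true) := by
  intro ns
  induction ns with
  | nil => intro st _ hinv; exact ⟨hinv, rfl, fun _ h => h⟩
  | cons n ns ih =>
    intro st hP hinv
    obtain ⟨h1, h2, h3⟩ := hf st n (hP n (by simp)) hinv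
    obtain ⟨g1, g2, g3⟩ := ih (f st n) (fun m hm => hP m (by simp [hm])) h1
    exact ⟨g1, by rw [List.foldl_cons]; omega, fun x hx => g3 x (h3 x hx)⟩

theorem push_good (dead : PySem.Set Int) :
    ∀ (st : PySem.Set Int × List Int) (n : Int), (0 ≤ n ∧ n < 1000) → PvInv st →
      PvInv (mcm_push dead st n) ∧
      unseenIn (mcm_push dead st n).1 + (mcm_push dead st n).2.length
        = unseenIn st.1 + st.2.length ∧
      (∀ x, st.1.contains x = true → (mcm_push dead st n).1.contains x = true) := by
  intro st n hn hinv
  unfold mcm_push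
  by_cases h : (!(st.1.contains n) && !(dead.contains n)) = true
  · have hns : st.1.contains n = false := by
      rcases Bool.and_eq_true .. |>.mp h with ⟨ha, _⟩
      simpa using ha
    rw [if_pos h]
    refine ⟨?_, ?_, ?_⟩
    · intro x hx
      simp only [List.mem_append, List.mem_singleton] at hx
      rcases hx with hx | hx
      · obtain ⟨hc, hr⟩ := hinv x hx
        exact ⟨by rw [contains_add, hc]; simp, hr⟩
      · subst hx
        exact ⟨by rw [contains_add]; simp, hn⟩
    · have := unseen_add st.1 n hn.1 hn.2 hns
      simp only [List.length_append, List.length_singleton]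
      omega
    · intro x hx
      rw [contains_add, hx]; simp
  · rw [if_neg h]
    exact ⟨hinv, rfl, fun _ h => h⟩

theorem expand_good (dead : PySem.Set Int) :
    ∀ (st : PySem.Set Int × List Int) (c : Int), (0 ≤ c ∧ c < 1000) → PvInv st →
      PvInv (mcm_expand dead st c) ∧
      unseenIn (mcm_expand dead st c).1 + (mcm_expand dead st c).2.length
        = unseenIn st.1 + st.2.length ∧
      (∀ x, st.1.contains x = true → (mcm_expand dead st c).1.contains x = true) := by
  intro st c hc hinv
  exact pv_foldl_step (push_good dead) (nbrs c) st (fun n hn => nbrs_range c hc.1 hc.2 n hn) hinv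

-- A's inner schedule-fold over the neighbors is B's push-fold, with the untouched part
-- of the queue as a prefix and each queued node paired with the common distance d
theorem sched_fold_eq (dead : PySem.Set Int) :
    ∀ (ns : List Int) (seen : PySem.Set Int) (pref : List (Int × Int)) (nxt : List Int) (d : Int),
      ns.foldl (fun st n => mcm_schedule dead st n d) (seen, pref ++ nxt.map (fun c => (c, d)))
      = ((ns.foldl (mcm_push dead) (seen, nxt)).1,
         pref ++ (ns.foldl (mcm_push dead) (seen, nxt)).2.map (fun c => (c, d))) := by
  intro ns
  induction ns with
  | nil => intro seen pref nxt d; rfl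
  | cons n ns ih =>
    intro seen pref nxt d
    simp only [List.foldl_cons]
    by_cases h : (!(seen.contains n) && !(dead.contains n)) = true
    · have hs : mcm_schedule dead (seen, pref ++ nxt.map (fun c => (c, d))) n d
          = (seen.add n, pref ++ (nxt ++ [n]).map (fun c => (c, d))) := by
        unfold mcm_schedule
        rw [if_pos h]
        simp [List.append_assoc]
      have hp : mcm_push dead (seen, nxt) n = (seen.add n, nxt ++ [n]) := by
        unfold mcm_push; rw [if_pos h]
      rw [hs, hp, ih]
    · have hs : mcm_schedule dead (seen, pref ++ nxt.map (fun c => (c, d))) n d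
          = (seen, pref ++ nxt.map (fun c => (c, d))) := by
        unfold mcm_schedule; rw [if_neg h]
      have hp : mcm_push dead (seen, nxt) n = (seen, nxt) := by
        unfold mcm_push; rw [if_neg h]
      rw [hs, hp, ih]

theorem loopA_nil (target : Int) (dead : PySem.Set Int) (fuel : Nat) (seen : PySem.Set Int) :
    mcm_loop target dead fuel seen [] = none := by
  cases fuel <;> rfl

theorem loopB_nil (target : Int) (dead : PySem.Set Int) (fuel : Nat) (seen : PySem.Set Int)
    (d : Int) : mcm_alt_loop target dead fuel seen [] d = none := by
  cases fuel with
  | zero => rfl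
  | succ f => simp [mcm_alt_loop]

-- A dequeues a whole level (no target inside) exactly as B's per-level expand fold
theorem loopA_level (target : Int) (dead : PySem.Set Int) :
    ∀ (pend : List Int) (fuel : Nat) (seen : PySem.Set Int) (nxt : List Int) (d : Int),
      (∀ x ∈ pend, x ≠ target) →
      mcm_loop target dead (pend.length + fuel) seen
        (pend.map (fun c => (c, d)) ++ nxt.map (fun c => (c, d + 1)))
      = mcm_loop target dead fuel (pend.foldl (mcm_expand dead) (seen, nxt)).1
          ((pend.foldl (mcm_expand dead) (seen, nxt)).2.map (fun c => (c, d + 1))) := by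
  intro pend
  induction pend with
  | nil => intro fuel seen nxt d _; simp
  | cons c rest ih =>
    intro fuel seen nxt d hne
    have hcons : (c :: rest).map (fun c => (c, d)) ++ nxt.map (fun c => (c, d + 1))
        = (c, d) :: (rest.map (fun c => (c, d)) ++ nxt.map (fun c => (c, d + 1))) := by simp
    rw [hcons]
    have hlen : (c :: rest).length + fuel = (rest.length + fuel) + 1 := by
      simp [List.length_cons]; omega
    rw [hlen]
    simp only [mcm_loop]
    rw [if_neg (hne c (by simp))]
    rw [sched_fold_eq dead (nbrs c) seen (rest.map (fun c => (c, d))) nxt (d + 1)]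
    simp only [List.foldl_cons]
    exact ih fuel (mcm_expand dead (seen, nxt) c).1 (mcm_expand dead (seen, nxt) c).2 d
      (fun x hx => hne x (by simp [hx]))

-- if the target sits in the current level, A returns the level's distance
theorem loopA_found (target : Int) (dead : PySem.Set Int) :
    ∀ (pend : List Int) (fuel : Nat) (seen : PySem.Set Int) (nxt : List Int) (d : Int),
      target ∈ pend →
      mcm_loop target dead (pend.length + fuel) seen
        (pend.map (fun c => (c, d)) ++ nxt.map (fun c => (c, d + 1))) = some d := by
  intro pend
  induction pend with
  | nil => intro _ _ _ _ h; cases h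
  | cons c rest ih =>
    intro fuel seen nxt d hmem
    have hcons : (c :: rest).map (fun c => (c, d)) ++ nxt.map (fun c => (c, d + 1))
        = (c, d) :: (rest.map (fun c => (c, d)) ++ nxt.map (fun c => (c, d + 1))) := by simp
    have hlen : (c :: rest).length + fuel = (rest.length + fuel) + 1 := by
      simp [List.length_cons]; omega
    rw [hcons, hlen]
    simp only [mcm_loop]
    by_cases hc : c = target
    · rw [if_pos hc]
    · rw [if_neg hc]
      rw [sched_fold_eq dead (nbrs c) seen (rest.map (fun c => (c, d))) nxt (d + 1)]
      have hm : target ∈ rest := by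
        rcases List.mem_cons.mp hmem with h | h
        · exact absurd h.symm hc
        · exact h
      exact ih fuel _ _ d hm

-- the heart: with enough fuel on both sides, A's queue loop on one level's worth of
-- queue equals B's level loop (strong induction on the number of unseen combinations)
theorem main_level (target : Int) (dead : PySem.Set Int) :
    ∀ (u : Nat) (seen : PySem.Set Int) (level : List Int) (d : Int) (fA fB : Nat),
      unseenIn seen = u →
      (∀ x ∈ level, seen.contains x = true ∧ 0 ≤ x ∧ x < 1000) →
      u + level.length < fA → u < fB →
      mcm_loop target dead fA seen (level.map (fun c => (c, d)))
        = mcm_alt_loop target dead fB seen level d := by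
  intro u
  induction u using Nat.strong_induction_on with
  | _ u ih =>
    intro seen level d fA fB hu hlev hfA hfB
    cases fA with
    | zero => omega
    | succ fA' =>
    cases fB with
    | zero => omega
    | succ fB' =>
    by_cases hnil : level = []
    · subst hnil
      rw [loopB_nil, List.map_nil, loopA_nil]
    · by_cases hmem : level.contains target = true
      · have hB : mcm_alt_loop target dead (fB' + 1) seen level d = some d := by
          simp only [mcm_alt_loop]
          rw [if_neg hnil, if_pos hmem]
        rw [hB]
        obtain ⟨f, hf⟩ : ∃ f, fA' + 1 = level.length + f :=
          ⟨fA' + 1 - level.length, by omega⟩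
        rw [hf]
        have hfr : level.map (fun c => (c, d))
            = level.map (fun c => (c, d)) ++ ([] : List Int).map (fun c => (c, d + 1)) := by simp
        rw [hfr]
        exact loopA_found target dead level f seen [] d (by simpa using hmem)
      · have hmem' : level.contains target = false := by
          cases h : level.contains target
          · rfl
          · exact absurd h hmem
        have hne : ∀ x ∈ level, x ≠ target := by
          intro x hx he
          apply hmem
          subst he
          simpa using hx
        have hB : mcm_alt_loop target dead (fB' + 1) seen level d
            = mcm_alt_loop target dead fB'
                (level.foldl (mcm_expand dead) (seen, [])).1
                (level.foldl (mcm_expand dead) (seen, [])).2 (d + 1) := by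
          simp only [mcm_alt_loop]
          rw [if_neg hnil, if_neg hmem]
        rw [hB]
        obtain ⟨f, hf⟩ : ∃ f, fA' + 1 = level.length + f ∧ u < f := by
          refine ⟨fA' + 1 - level.length, by omega, by omega⟩
        rw [hf.1]
        have hfr : level.map (fun c => (c, d))
            = level.map (fun c => (c, d)) ++ ([] : List Int).map (fun c => (c, d + 1)) := by simp
        rw [hfr, loopA_level target dead level f seen [] d hne]
        set st := level.foldl (mcm_expand dead) (seen, ([] : List Int)) with hst
        obtain ⟨ginv, gcnt, _⟩ := pv_foldl_step (expand_good dead) level (seen, [])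
          (fun c hc => (hlev c hc).2) (by intro x hx; cases hx)
        rw [← hst] at ginv gcnt
        simp only [List.length_nil, Nat.add_zero, hu] at gcnt
        by_cases hn2 : st.2 = []
        · rw [hn2, List.map_nil, loopA_nil, loopB_nil]
        · have hlenpos : 0 < st.2.length := List.length_pos_iff.mpr hn2
          exact ih (unseenIn st.1) (by omega) st.1 st.2 (d + 1) f fB' rfl ginv
            (by omega) (by omega)

-- ===== VERDICT (by name: the statement is the Claim_ definition above) =====
theorem minimal_combination_moves_spec : Claim_equal_minimal_combination_moves := by
  intro t de _
  unfold Spec_minimal_combination_moves minimal_combination_moves minimal_combination_moves_alt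
  set dead := PySem.Set.ofList (de.getD []) with hd
  by_cases h0 : dead.contains 0 = true
  · have hs : mcm_schedule dead (PySem.Set.empty, []) 0 0 = (PySem.Set.empty, []) := by
      unfold mcm_schedule
      rw [if_neg (by rw [h0]; simp)]
    simp only [hs]
    rw [loopA_nil, if_neg (by rw [h0]; simp), loopB_nil]
  · have h0' : dead.contains 0 = false := by
      cases h : dead.contains 0
      · rfl
      · exact absurd h h0
    have hs : mcm_schedule dead (PySem.Set.empty, []) 0 0
        = (PySem.Set.empty.add 0, [((0 : Int), (0 : Int))]) := by
      unfold mcm_schedule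
      rw [if_pos (by rw [h0']; rfl)]
      rfl
    simp only [hs]
    rw [if_pos (by rw [h0']; rfl)]
    have hseen0 : (PySem.Set.empty.add (0 : Int)).contains 0 = true := by decide
    have hle := unseen_le_of_zero _ hseen0
    have hfr : [((0 : Int), (0 : Int))] = [(0 : Int)].map (fun c => (c, (0 : Int))) := by simp
    rw [hfr]
    exact main_level t dead (unseenIn (PySem.Set.empty.add 0)) (PySem.Set.empty.add 0)
      [0] 0 1001 1001 rfl
      (by intro x hx; simp at hx; subst hx; exact ⟨hseen0, by omega, by omega⟩)
      (by simp only [List.length_cons, List.length_nil]; omega) (by omega)
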